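-- pv_equiv track=rewrite | github.com/luyizhou4/espnet | egs/codeswitching/asr/local_yzl23/lid_classifier_ark2change_point/ark2change_point.py | merge_frameids_approximation
-- ===== SOURCE A (Python) =====
-- def merge_frameids_approximation(frame_lids):
--     new_frame_ids = []
--     frame_num = len(frame_lids)
--     assert frame_num >= 3
--     for i in range(frame_num):
--         left = frame_lids[i-1] if i > 0 else frame_lids[2]
--         right = frame_lids[i+1] if i < (frame_num-1) else frame_lids[frame_num-3]
--         mid = frame_lids[i]
--         result = 0 if (mid+left+right) < 2 else 1
--         new_frame_ids.append(result)
--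
--     frame_lids = new_frame_ids
--     merged_lid_list = [frame_lids[0]]
--     for lid in frame_lids:
--         if lid == merged_lid_list[-1]:
--             continue
--         else:
--             merged_lid_list.append(lid)
--     return merged_lid_list
-- ===== SOURCE B (Python) =====
-- def merge_frameids_approximation(frame_lids):
--     n = len(frame_lids)
--     assert n >= 3
--     def maj(i):
--         left = frame_lids[i-1] if i > 0 else frame_lids[2]
--         right = frame_lids[i+1] if i < n-1 else frame_lids[n-3]
--         return 1 if frame_lids[i] + left + right >= 2 else 0
--     first = maj(0)
--     changes = sum(1 for i in range(1, n) if maj(i) != maj(i-1))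
--     return [(first + j) % 2 for j in range(changes + 1)]
-- ===== Notes on version B (the rewrite author's own statement) =====
-- stated objective: alternative
-- what changed: B never builds the smoothed list nor runs A's dedup scan: since smoothed values are binary, the deduped result must alternate 0/1, so B computes the first smoothed value and the number of change points between adjacent smoothed frames, then emits the answer in closed form as [(first+j)%2 for j in range(changes+1)].
import Mathlib
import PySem

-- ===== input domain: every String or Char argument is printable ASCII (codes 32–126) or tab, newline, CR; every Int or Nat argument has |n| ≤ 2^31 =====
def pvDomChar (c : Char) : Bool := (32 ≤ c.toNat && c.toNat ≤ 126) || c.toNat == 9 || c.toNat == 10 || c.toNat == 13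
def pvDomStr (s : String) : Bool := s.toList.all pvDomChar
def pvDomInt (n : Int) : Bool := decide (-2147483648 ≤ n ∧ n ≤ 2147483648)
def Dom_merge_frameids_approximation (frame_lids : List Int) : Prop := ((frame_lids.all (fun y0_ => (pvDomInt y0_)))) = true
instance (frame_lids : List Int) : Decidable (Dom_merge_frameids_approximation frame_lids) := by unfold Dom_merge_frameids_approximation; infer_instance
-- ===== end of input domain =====

-- B replaces A's smoothed-list construction and dedup scan by a closed form: smoothed
-- values are binary, so the deduped result alternates; B counts change points and emits
-- [(first+j)%2 for j < changes+1] (objective: alternative algorithm, same O(n) cost).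


-- ===== PORT A =====
-- Literal port of A: first loop builds the smoothed list new_frame_ids; second loop
-- seeds the output with new_frame_ids[0] and appends each element that differs from
-- the last output element.  (All indices are in range when length ≥ 3, so pyGetD's
-- default 0 is never used inside Pre_.)
def merge_frameids_approximation (frame_lids : List Int) : List Int :=
  let n := frame_lids.length
  if n < 3 then [] else   -- assert frame_num >= 3 (raises outside Pre_)
  let newIds := (List.range n).map (fun (i : Nat) =>
    let left := if 0 < i then PySem.List.pyGetD frame_lids ((i : Int) - 1) 0
                else PySem.List.pyGetD frame_lids 2 0
    let right := if (i : Int) < (n : Int) - 1 then PySem.List.pyGetD frame_lids ((i : Int) + 1) 0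
                 else PySem.List.pyGetD frame_lids ((n : Int) - 3) 0
    let mid := PySem.List.pyGetD frame_lids (i : Int) 0
    if mid + left + right < 2 then (0 : Int) else 1)
  newIds.foldl
    (fun acc lid => if lid = (acc.getLast?).getD 0 then acc else acc ++ [lid])
    [PySem.List.pyGetD newIds 0 0]

-- ===== PORT B =====
-- helper maj from Source B (majority vote of frame i with its boundary rules)
def majB (frame_lids : List Int) (n : Nat) (i : Nat) : Int :=
  let left := if 0 < i then PySem.List.pyGetD frame_lids ((i : Int) - 1) 0
              else PySem.List.pyGetD frame_lids 2 0
  let right := if (i : Int) < (n : Int) - 1 then PySem.List.pyGetD frame_lids ((i : Int) + 1) 0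
               else PySem.List.pyGetD frame_lids ((n : Int) - 3) 0
  if 2 ≤ PySem.List.pyGetD frame_lids (i : Int) 0 + left + right then (1 : Int) else 0

def merge_frameids_approximation_alt (frame_lids : List Int) : List Int :=
  let n := frame_lids.length
  if n < 3 then [] else   -- assert n >= 3 (raises outside Pre_)
  let first := majB frame_lids n 0
  let changes := ((List.range' 1 (n - 1)).filter
      (fun i => decide (majB frame_lids n i ≠ majB frame_lids n (i - 1)))).length
  (List.range (changes + 1)).map (fun (j : Nat) => PySem.Int.mod (first + (j : Int)) 2)

-- ===== PRECONDITION & SPEC =====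
-- Pre_: the assert in A requires at least 3 frames; A raises AssertionError otherwise.
def Pre_merge_frameids_approximation (frame_lids : List Int) : Prop := 3 ≤ frame_lids.length
instance (frame_lids : List Int) : Decidable (Pre_merge_frameids_approximation frame_lids) := by
  unfold Pre_merge_frameids_approximation; infer_instance
def pvWitness_merge_frameids_approximation : List Int := [0, 1, 1, 0]

def Spec_merge_frameids_approximation (frame_lids : List Int) (out : List Int) : Prop := out = merge_frameids_approximation_alt frame_lids
instance (frame_lids : List Int) (out : List Int) : Decidable (Spec_merge_frameids_approximation frame_lids out) := by unfold Spec_merge_frameids_approximation; infer_instance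

-- ===== CLAIM (what is proved, stated in full; the proofs are below) =====
def Claim_equal_merge_frameids_approximation : Prop := ∀ (frame_lids : List Int), Dom_merge_frameids_approximation frame_lids → Pre_merge_frameids_approximation frame_lids → Spec_merge_frameids_approximation frame_lids (merge_frameids_approximation frame_lids)

-- ===== LEMMAS AND PROOFS =====

-- A's dedup step, named for the proofs.
def stepA (acc : List Int) (lid : Int) : List Int :=
  if lid = (acc.getLast?).getD 0 then acc else acc ++ [lid]

-- dedup of ys relative to a last-emitted value
def dedupFrom (last : Int) : List Int → List Int
  | [] => []
  | y :: t => if y = last then dedupFrom last t else y :: dedupFrom y t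

-- the alternating tail: k values flipping starting from 1 - last
def altTail (last : Int) : Nat → List Int
  | 0 => []
  | k + 1 => (1 - last) :: altTail (1 - last) k

-- number of change points of (last :: ys)
def cnt (last : Int) : List Int → Nat
  | [] => 0
  | y :: t => (if y = last then 0 else 1) + cnt y t

lemma foldl_stepA_eq (ys : List Int) :
    ∀ acc : List Int, acc ≠ [] →
      List.foldl stepA acc ys = acc ++ dedupFrom ((acc.getLast?).getD 0) ys := by
  induction ys with
  | nil => intro acc _; simp [dedupFrom]
  | cons y t ih =>
    intro acc h
    simp only [List.foldl_cons, stepA, dedupFrom]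
    by_cases hy : y = (acc.getLast?).getD 0
    · simp [hy, ih acc h]
    · simp only [hy, if_false]
      rw [ih (acc ++ [y]) (by simp)]
      simp

lemma dedupFrom_alt (ys : List Int) :
    ∀ last : Int, (∀ y ∈ ys, y = 0 ∨ y = 1) → (last = 0 ∨ last = 1) →
      dedupFrom last ys = altTail last (cnt last ys) := by
  induction ys with
  | nil => intro last _ _; simp [dedupFrom, cnt, altTail]
  | cons y t ih =>
    intro last hb hl
    have hyb : y = 0 ∨ y = 1 := hb y (by simp)
    have htb : ∀ z ∈ t, z = 0 ∨ z = 1 := fun z hz => hb z (by simp [hz])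
    by_cases hy : y = last
    · subst hy
      simp only [dedupFrom, cnt]
      simpa using ih y htb hyb
    · have hflip : y = 1 - last := by rcases hyb with h | h <;> rcases hl with h' | h' <;> omega
      simp only [dedupFrom, cnt, if_neg hy]
      rw [ih y htb hyb]
      have : altTail last (1 + cnt y t) = (1 - last) :: altTail (1 - last) (cnt y t) := by
        have : 1 + cnt y t = cnt y t + 1 := by omega
        rw [this]; rfl
      rw [this, hflip]

lemma cnt_eq_filter (s : Nat → Int) (m : Nat) :
    ∀ a : Nat, 1 ≤ a →
      cnt (s (a - 1)) ((List.range' a m).map s)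
        = ((List.range' a m).filter (fun i => decide (s i ≠ s (i - 1)))).length := by
  induction m with
  | zero => intro a _; simp [cnt]
  | succ k ih =>
    intro a ha
    rw [List.range'_succ]
    simp only [List.map_cons, cnt, List.filter_cons]
    have h1 : a + 1 - 1 = a := by omega
    have := ih (a + 1) (by omega)
    rw [h1] at this
    rw [this]
    by_cases hs : s a = s (a - 1)
    · simp [hs]
    · simp [hs]
      omega

lemma range'_shift (k : Nat) : ∀ a : Nat, List.range' (a + 1) k = (List.range' a k).map (· + 1) := by
  induction k with
  | zero => intro a; rfl
  | succ m ih => intro a; rw [List.range'_succ, List.range'_succ, List.map_cons, ih (a + 1)]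

lemma mod_two_flip (first : Int) (hf : first = 0 ∨ first = 1) (j : Nat) :
    PySem.Int.mod (first + ((j : Int) + 1)) 2 = PySem.Int.mod ((1 - first) + (j : Int)) 2 := by
  rw [PySem.Int.mod_eq_emod_of_pos (show (0:Int) < 2 by norm_num),
    PySem.Int.mod_eq_emod_of_pos (show (0:Int) < 2 by norm_num)]
  rcases hf with h | h <;> subst h <;> omega

lemma altTail_map (k : Nat) :
    ∀ first : Int, (first = 0 ∨ first = 1) →
      (List.range' 1 k).map (fun (j : Nat) => PySem.Int.mod (first + (j : Int)) 2)
        = altTail first k := by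
  induction k with
  | zero => intro first _; rfl
  | succ m ih =>
    intro first hf
    rw [List.range'_succ, List.map_cons]
    have hhead : PySem.Int.mod (first + (1 : Nat)) 2 = 1 - first := by
      rw [PySem.Int.mod_eq_emod_of_pos (show (0:Int) < 2 by norm_num)]
      push_cast
      rcases hf with h | h <;> subst h <;> omega
    have htail : (List.range' 2 m).map (fun (j : Nat) => PySem.Int.mod (first + (j : Int)) 2)
        = altTail (1 - first) m := by
      rw [show (2 : Nat) = 1 + 1 from rfl, range'_shift m 1, List.map_map]
      rw [← ih (1 - first) (by omega)]
      apply List.map_congr_left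
      intro j _
      simp only [Function.comp]
      push_cast
      exact mod_two_flip first hf j
    rw [hhead, htail]
    rfl

-- A's inline smoothing expression is majB with the threshold branch flipped
lemma majA_eq (xs : List Int) (n i : Nat) :
    (let left := if 0 < i then PySem.List.pyGetD xs ((i : Int) - 1) 0
                 else PySem.List.pyGetD xs 2 0
     let right := if (i : Int) < (n : Int) - 1 then PySem.List.pyGetD xs ((i : Int) + 1) 0
                  else PySem.List.pyGetD xs ((n : Int) - 3) 0
     let mid := PySem.List.pyGetD xs (i : Int) 0
     if mid + left + right < 2 then (0 : Int) else 1) = majB xs n i := by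
  have h :
    (let left := if 0 < i then PySem.List.pyGetD xs ((i : Int) - 1) 0
                 else PySem.List.pyGetD xs 2 0
     let right := if (i : Int) < (n : Int) - 1 then PySem.List.pyGetD xs ((i : Int) + 1) 0
                  else PySem.List.pyGetD xs ((n : Int) - 3) 0
     let mid := PySem.List.pyGetD xs (i : Int) 0
     if mid + left + right < 2 then (0 : Int) else 1)
    = (let left := if 0 < i then PySem.List.pyGetD xs ((i : Int) - 1) 0
                 else PySem.List.pyGetD xs 2 0
       let right := if (i : Int) < (n : Int) - 1 then PySem.List.pyGetD xs ((i : Int) + 1) 0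
                  else PySem.List.pyGetD xs ((n : Int) - 3) 0
       if 2 ≤ PySem.List.pyGetD xs (i : Int) 0 + left + right then (1 : Int) else 0) := by
    simp only []
    split_ifs <;> omega
  exact h

lemma majB_binary (xs : List Int) (n i : Nat) : majB xs n i = 0 ∨ majB xs n i = 1 := by
  unfold majB
  exact (ite_eq_or_eq _ _ _).symm

-- ===== VERDICT (by name: the statement is the Claim_ definition above) =====
theorem merge_frameids_approximation_spec : Claim_equal_merge_frameids_approximation := by
  intro xs _ hpre
  unfold Pre_merge_frameids_approximation at hpre
  show merge_frameids_approximation xs = merge_frameids_approximation_alt xs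
  unfold merge_frameids_approximation merge_frameids_approximation_alt
  have hn : ¬ xs.length < 3 := by omega
  simp only [hn, if_false]
  set n := xs.length with hnn
  have hA :
      (List.range n).map (fun (i : Nat) =>
        let left := if 0 < i then PySem.List.pyGetD xs ((i : Int) - 1) 0
                    else PySem.List.pyGetD xs 2 0
        let right := if (i : Int) < (n : Int) - 1 then PySem.List.pyGetD xs ((i : Int) + 1) 0
                     else PySem.List.pyGetD xs ((n : Int) - 3) 0
        let mid := PySem.List.pyGetD xs (i : Int) 0
        if mid + left + right < 2 then (0 : Int) else 1)
        = (List.range n).map (majB xs n) := by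
    apply List.map_congr_left; intro i _
    exact majA_eq xs n i
  rw [hA]
  have hsplit : List.range n = 0 :: List.range' 1 (n - 1) := by
    rw [List.range_eq_range']
    obtain ⟨m, hm⟩ : ∃ m, n = m + 1 := ⟨n - 1, by omega⟩
    rw [hm, List.range'_succ]
    simp
  rw [hsplit, List.map_cons]
  have hhead : PySem.List.pyGetD (majB xs n 0 :: (List.range' 1 (n - 1)).map (majB xs n)) 0 0
      = majB xs n 0 := by
    simp [PySem.List.pyGetD, PySem.List.pyGet?, PySem.List.pyIdx?]
  rw [hhead]
  have hfirst : stepA [majB xs n 0] (majB xs n 0) = [majB xs n 0] := by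
    simp [stepA]
  show List.foldl stepA [majB xs n 0] (majB xs n 0 :: (List.range' 1 (n - 1)).map (majB xs n)) = _
  rw [List.foldl_cons, hfirst,
    foldl_stepA_eq _ [majB xs n 0] (by simp)]
  simp only [List.getLast?_singleton, Option.getD_some]
  have hbinL : ∀ y ∈ (List.range' 1 (n - 1)).map (majB xs n), y = 0 ∨ y = 1 := by
    intro y hy
    simp only [List.mem_map] at hy
    obtain ⟨i, _, rfl⟩ := hy
    exact majB_binary xs n i
  rw [dedupFrom_alt _ (majB xs n 0) hbinL (majB_binary xs n 0)]
  have hcnt := cnt_eq_filter (majB xs n) (n - 1) 1 (le_refl 1)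
  simp only [Nat.sub_self] at hcnt
  rw [hcnt]
  -- B's side: peel off j = 0 and use altTail_map
  set k := ((List.range' 1 (n - 1)).filter
      (fun i => decide (majB xs n i ≠ majB xs n (i - 1)))).length with hk
  have hB : (List.range (k + 1)).map (fun (j : Nat) => PySem.Int.mod (majB xs n 0 + (j : Int)) 2)
      = majB xs n 0 :: altTail (majB xs n 0) k := by
    have hsp : List.range (k + 1) = 0 :: List.range' 1 k := by
      rw [List.range_eq_range', List.range'_succ]
    rw [hsp, List.map_cons, altTail_map k (majB xs n 0) (majB_binary xs n 0)]
    congr 1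
    rw [PySem.Int.mod_eq_emod_of_pos (show (0:Int) < 2 by norm_num)]
    push_cast
    rcases majB_binary xs n 0 with h | h <;> rw [h] <;> norm_num
  rw [hB]
  rfl
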